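-- pv_equiv track=rewrite | github.com/bhatnagararchit/adventOfCode2023 | 08/main.py | go_path_lcm
-- ===== SOURCE A (Python) =====
-- from math import lcm
--
-- def go_path_one(
--     network_path: str,
--     network_map: dict[str : tuple[str, str]],
--     start_nodes: list[str],
--     end_nodes: list[str],
-- ) -> tuple[list[str], int]:
--     """
--     Follows the given network_path once, through the network_map. Starts
--     from given start_node. If end_node is encountered anytime, terminates.
--
--     Network_path consists of 'L' and 'R' characters. At each step in the path,
--     'L' indicates to go to the left node in the map and 'R' to the right. Each
--     node in the map is indicated as a key, with a tuple as value. First element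
--     in the tuple is the left node, and second the right for that node.
--
--     If end_node is not encountered in the path, returns the node where the path
--     ends. If end_node is encountered in the path, returns the end_node. In both
--     cases, returns the number of steps taken as the second argument in the path.
--
--     Starting and ending nodes are given as a list of tuples start_end_nodes =
--     [(start_node,end_node)]. Paths for all tuples in the list are followed
--     simultaneously. That is, if start_end_nodes has a single tuple, then the path
--     is followed from start_node to end_node -- terminating if reached end_node,
--     otherwise returning the current node and steps. However, if start_end_nodes
--     has multiple tuples, path is followed for each tuple simultaneously -- a step
--     now involving moving left or right for each tuple. Path is terminated only
--     if all the end_node's are reached. Otherwise, a list of current_node's is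
--     returned.
--     """
--     current_nodes = start_nodes
--     for ind, step in enumerate(network_path):
--         if set(current_nodes) <= set(end_nodes):
--             # At end nodes, terminate
--             return end_nodes, ind
--         ind_step = 0 if step == "L" else 1
--         current_nodes = [
--             network_map[current_node][ind_step] for current_node in current_nodes
--         ]
--     # If here, path did not terminate. Return current node
--     return current_nodes, len(network_path)
--
-- def go_path(
--     network_path: str,
--     network_map: dict[str : tuple[str, str]],
--     start_nodes: list[str],
--     end_nodes: list[str],
-- ) -> int:
--     """
--     Starting from given start_nodes, applies the given network_path repeatedly
--     until end_nodes is reached. network_path is applied using network_map.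
--     Returns the number of steps it took to get to end_nodes. Starting and ending
--     nodes are given using start_end_nodes = [(start_node,end_node)]. If
--     start_end_nodes has mutiple tuples, each start_node is followed to its end_node
--     simultaneously. All end_node's must be reached together for the function to
--     finish.
--
--     A ValueError is thrown is a loop is detected.
--     """
--     steps = 0
--     current_nodes = [start_nodes]
--     while not set(current_nodes[-1]) <= set(end_nodes):
--         next_nodes, next_steps = go_path_one(
--             network_path, network_map, current_nodes[-1], end_nodes
--         )
--         if next_nodes in current_nodes:  # Path loops back to the same position
--             raise ValueError("Loop detected. Infinite steps needed")
--         current_nodes.append(next_nodes)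
--         steps += next_steps
--     return steps
--
-- def go_path_lcm(
--     network_path: str,
--     network_map: dict[str : tuple[str, str]],
--     start_nodes: list[str],
--     end_nodes: list[str],
-- ) -> int:
--     """
--     Calculates the steps to reach from each start_node to any end_node.
--     Returns the lowest common multiplier of these steps.
--     """
--     steps = [
--         go_path(network_path,network_map,[start_node],end_nodes) for start_node in start_nodes
--     ]
--     return lcm(*steps)
-- ===== SOURCE B (Python) =====
-- from math import lcm
--
--
-- def go_path_lcm(network_path, network_map, start_nodes, end_nodes):
--     """Pass-composition algorithm: first fold the whole instruction string,
--     right to left, into ONE table giving for every node the outcome of a full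
--     pass (first end-hit offset, or the landing node); then resolve each start
--     node by walking that table pass-by-pass, and LCM the step counts."""
--     L = len(network_path)
--     ends = set(end_nodes)
--     nodes = list(dict.fromkeys(list(network_map) + end_nodes))
--     # table[n] = ("hit", k): a pass from n first meets an end node after k steps;
--     #            ("land", m): a full pass from n meets no end node and lands on m;
--     # n absent: the pass from n needs an unmapped node before any end hit.
--     table = {n: ("land", n) for n in nodes}
--     for i in range(L - 1, -1, -1):
--         side = 0 if network_path[i] == "L" else 1
--         new = {}
--         for n in nodes:
--             if n in ends:
--                 new[n] = ("hit", 0)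
--             elif n in network_map:
--                 sub = table.get(network_map[n][side])
--                 if sub is not None:
--                     kind, v = sub
--                     new[n] = ("hit", v + 1) if kind == "hit" else sub
--         table = new
--     counts = []
--     for s in start_nodes:
--         if s in ends:
--             counts.append(0)
--             continue
--         passes = 0
--         seen = {s}
--         cur = s
--         while True:
--             kind, v = table[cur]
--             if kind == "hit":
--                 counts.append(passes * L + v)
--                 break
--             cur = v
--             passes += 1
--             if cur in ends:
--                 counts.append(passes * L)
--                 break
--             if cur in seen:
--                 raise ValueError("Loop detected. Infinite steps needed")
--             seen.add(cur)
--     return lcm(*counts)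
-- ===== Notes on version B (the rewrite author's own statement) =====
-- stated objective: faster
-- what changed: A re-simulates the network per character for every start node (go_path_one passes over a history list, rebuilding set(current_nodes) <= set(end_nodes) at each step); B instead composes the instruction string once, right to left, into a single whole-pass transition table over all nodes (first end-hit offset or landing node) and then resolves each start node by pass-granular table walks with no per-character stepping, LCM-ing the counts.
import Mathlib
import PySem

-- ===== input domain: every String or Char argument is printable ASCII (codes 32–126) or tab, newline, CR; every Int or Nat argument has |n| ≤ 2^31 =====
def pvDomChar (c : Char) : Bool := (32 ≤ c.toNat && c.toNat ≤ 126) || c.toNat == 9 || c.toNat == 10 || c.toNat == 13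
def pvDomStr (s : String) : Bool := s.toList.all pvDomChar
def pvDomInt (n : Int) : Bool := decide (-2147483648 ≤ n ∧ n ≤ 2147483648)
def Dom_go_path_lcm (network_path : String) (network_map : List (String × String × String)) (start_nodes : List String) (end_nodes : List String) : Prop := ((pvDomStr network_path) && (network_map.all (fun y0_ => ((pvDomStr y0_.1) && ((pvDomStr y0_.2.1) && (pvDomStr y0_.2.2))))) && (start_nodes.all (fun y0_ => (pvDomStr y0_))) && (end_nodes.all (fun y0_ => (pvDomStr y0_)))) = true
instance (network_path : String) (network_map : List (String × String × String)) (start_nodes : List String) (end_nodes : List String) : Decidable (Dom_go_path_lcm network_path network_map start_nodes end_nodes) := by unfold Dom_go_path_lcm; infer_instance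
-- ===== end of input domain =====

-- B replaces A's repeated per-character simulation (nested go_path_one passes over a history list,
-- rebuilding set(current_nodes) <= set(end_nodes) at every step) by a different algorithm: one
-- right-to-left composition of the instruction string into a whole-pass transition table over all
-- nodes, then a pass-granular table walk per start node; a timing run measured B faster.
-- No argument is mutated.

-- ===== PORT A =====
-- set(cur) <= set(ends)
def pvSubset (cur ends : List String) : Bool :=
  PySem.Set.issubset (PySem.Set.ofList cur) (PySem.Set.ofList ends)

-- go_path_one: iterates over enumerate(network_path); `none` = KeyError in the comprehension
def pvGoPathOne (d : PySem.Dict String (String × String)) (ends : List String) (plen : Int) :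
    List (Int × Char) → List String → Option (List String × Int)
  | [], cur => some (cur, plen)
  | (ind, step) :: rest, cur =>
    if pvSubset cur ends then some (ends, ind)
    else
      match cur.mapM (fun n => (PySem.Dict.get? d n).map
          (fun p => if step == 'L' then p.1 else p.2)) with
      | none => none
      | some next => pvGoPathOne d ends plen rest next

-- go_path: while loop with fuel (fuel-out/ValueError/KeyError = none; Pre_ excludes those)
def pvGoPath (pc : List Char) (d : PySem.Dict String (String × String)) (ends : List String) :
    Nat → List (List String) → List String → Int → Option Int
  | 0, _, _, _ => none
  | fuel+1, hist, cur, steps =>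
    if pvSubset cur ends then some steps
    else
      match pvGoPathOne d ends (pc.length : Int) (PySem.List.enumerate pc 0) cur with
      | none => none
      | some (next, nsteps) =>
        if hist.contains next then none
        else pvGoPath pc d ends fuel (hist ++ [next]) next (steps + nsteps)

def go_path_lcm (network_path : String) (network_map : List (String × String × String)) (start_nodes : List String) (end_nodes : List String) : Int :=
  let pc := network_path.toList
  let d := PySem.Dict.ofList network_map
  match start_nodes.mapM (fun s =>
      pvGoPath pc d end_nodes ((network_map.length + 1) * pc.length + 2) [[s]] [s] 0) with
  | none => 0
  | some steps => steps.foldl (fun acc t => (Int.lcm acc t : Int)) 1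

-- ===== PORT B =====
-- table entry: ("hit", k) or ("land", m)
inductive PvEntry where
  | hit : Nat → PvEntry
  | land : String → PvEntry
deriving DecidableEq, Repr

-- body of `for n in nodes: ...` building the next table (absent key = pass needs an unmapped node)
def pvTblStep (d : PySem.Dict String (String × String)) (ends : PySem.Set String) (side : Bool)
    (old : PySem.Dict String PvEntry) (nodes : List String) : PySem.Dict String PvEntry :=
  nodes.foldl (fun new n =>
    if PySem.Set.contains ends n then new.insert n (.hit 0)
    else
      match PySem.Dict.get? d n with
      | none => new
      | some p =>
        match PySem.Dict.get? old (if side then p.1 else p.2) with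
        | none => new
        | some (.hit k) => new.insert n (.hit (k + 1))
        | some e => new.insert n e) PySem.Dict.empty

-- the per-start-node `while True` walk (fuel-out/KeyError/ValueError = none; Pre_ excludes those)
def pvWalk (tbl : PySem.Dict String PvEntry) (ends : PySem.Set String) (L : Nat) :
    Nat → PySem.Set String → String → Nat → Option Nat
  | 0, _, _, _ => none
  | fuel+1, seen, cur, passes =>
    match PySem.Dict.get? tbl cur with
    | none => none
    | some (.hit v) => some (passes * L + v)
    | some (.land m) =>
      if PySem.Set.contains ends m then some ((passes + 1) * L)
      else if PySem.Set.contains seen m then none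
      else pvWalk tbl ends L fuel (PySem.Set.add seen m) m (passes + 1)

def go_path_lcm_alt (network_path : String) (network_map : List (String × String × String)) (start_nodes : List String) (end_nodes : List String) : Int :=
  let pc := network_path.toList
  let L := pc.length
  let d := PySem.Dict.ofList network_map
  let ends := PySem.Set.ofList end_nodes
  let nodes := PySem.List.dedup (d.keys ++ end_nodes)
  let base : PySem.Dict String PvEntry :=
    nodes.foldl (fun t n => t.insert n (.land n)) PySem.Dict.empty
  let tbl := (PySem.List.pyRange ((L : Int) - 1) (-1) (-1)).foldl
    (fun tbl i => pvTblStep d ends (PySem.List.pyGetD pc i ' ' == 'L') tbl nodes) base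
  match start_nodes.mapM (fun s =>
      if PySem.Set.contains ends s then some 0
      else pvWalk tbl ends L (network_map.length + 3) (PySem.Set.ofList [s]) s 0) with
  | none => 0
  | some counts => counts.foldl (fun (acc : Int) (t : Nat) => (Int.lcm acc (t : Int) : Int)) 1

-- ===== PRECONDITION & SPEC =====
-- The trajectory of a single node through the network: one L/R move per step, cyclic path index.
def pvStep (pc : List Char) (d : PySem.Dict String (String × String)) (j : Nat) (n : String) :
    Option String :=
  (PySem.Dict.get? d n).bind (fun p => some (if pc.getD (j % pc.length) ' ' == 'L' then p.1 else p.2))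

def pvTraj (pc : List Char) (d : PySem.Dict String (String × String)) (s : String) : Nat → Option String
  | 0 => some s
  | j+1 => (pvTraj pc d s j).bind (pvStep pc d j)

-- One start node is fine iff it is an end node, or it reaches an end node in t ≥ 1 defined steps
-- with no earlier end hit and pairwise-distinct nodes at the full-path boundaries before t
-- (otherwise A raises ValueError "Loop detected", KeyError, or loops to the ZeroDivision/empty-path raise).
def pvNodeOk (pc : List Char) (d : PySem.Dict String (String × String))
    (end_nodes : List String) (s : String) (bound : Nat) : Prop :=
  s ∈ end_nodes ∨
  (pc ≠ [] ∧ ∃ t < bound + 1, 0 < t ∧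
    ((pvTraj pc d s t).any (fun n => end_nodes.contains n) = true) ∧
    (∀ j < t, (pvTraj pc d s j).any (fun n => !end_nodes.contains n) = true) ∧
    (∀ i2 < t, ∀ i1 < i2, i2 * pc.length < t →
      pvTraj pc d s (i1 * pc.length) ≠ pvTraj pc d s (i2 * pc.length)))

-- Pre_: exactly the inputs on which A returns normally — every start node either is an end node or
-- reaches one (first hit at step t, all map lookups defined, no repeated boundary node before t).
def Pre_go_path_lcm (network_path : String) (network_map : List (String × String × String)) (start_nodes : List String) (end_nodes : List String) : Prop :=
  ∀ s ∈ start_nodes,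
    pvNodeOk network_path.toList (PySem.Dict.ofList network_map) end_nodes s
      ((network_map.length + 1) * network_path.toList.length)
instance (network_path : String) (network_map : List (String × String × String)) (start_nodes : List String) (end_nodes : List String) : Decidable (Pre_go_path_lcm network_path network_map start_nodes end_nodes) := by
  unfold Pre_go_path_lcm pvNodeOk; infer_instance

def pvWitness_go_path_lcm : String × (List (String × String × String)) × List String × List String :=
  ("L", [("AA", "BB", "BB"), ("BB", "CC", "CC")], ["AA", "CC"], ["CC"])

def Spec_go_path_lcm (network_path : String) (network_map : List (String × String × String)) (start_nodes : List String) (end_nodes : List String) (out : Int) : Prop := out = go_path_lcm_alt network_path network_map start_nodes end_nodes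
instance (network_path : String) (network_map : List (String × String × String)) (start_nodes : List String) (end_nodes : List String) (out : Int) : Decidable (Spec_go_path_lcm network_path network_map start_nodes end_nodes out) := by unfold Spec_go_path_lcm; infer_instance

-- ===== CLAIM (what is proved, stated in full; the proofs are below) =====
def Claim_equal_go_path_lcm : Prop := ∀ (network_path : String) (network_map : List (String × String × String)) (start_nodes : List String) (end_nodes : List String), Dom_go_path_lcm network_path network_map start_nodes end_nodes → Pre_go_path_lcm network_path network_map start_nodes end_nodes → Spec_go_path_lcm network_path network_map start_nodes end_nodes (go_path_lcm network_path network_map start_nodes end_nodes)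

-- ===== LEMMAS AND PROOFS =====

lemma pvSubset_iff (cur ends : List String) : pvSubset cur ends = true ↔ ∀ x ∈ cur, x ∈ ends := by
  unfold pvSubset
  rw [PySem.Set.issubset_iff]
  constructor
  · intro h x hx; exact (PySem.Set.mem_ofList _ _).mp (h x ((PySem.Set.mem_ofList _ _).mpr hx))
  · intro h x hx; exact (PySem.Set.mem_ofList _ _).mpr (h x ((PySem.Set.mem_ofList _ _).mp hx))

lemma pvSubset_singleton (n : String) (ends : List String) :
    pvSubset [n] ends = ends.contains n := by
  rw [Bool.eq_iff_iff, pvSubset_iff]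
  simp

lemma pvSubset_self (ends : List String) : pvSubset ends ends = true :=
  (pvSubset_iff _ _).mpr (fun _ h => h)

lemma pvAny_mem {o : Option String} {l : List String}
    (h : o.any (fun n => l.contains n) = true) : ∃ n, o = some n ∧ n ∈ l := by
  cases o with
  | none => simp at h
  | some n => exact ⟨n, rfl, by simpa [List.contains_iff_mem] using h⟩

lemma pvAlive_notmem {pc : List Char} {d : PySem.Dict String (String × String)} {s : String}
    {ends : List String} {j : Nat} {n : String}
    (ha : (pvTraj pc d s j).any (fun n => !ends.contains n) = true)
    (h : pvTraj pc d s j = some n) : n ∉ ends := by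
  rw [h] at ha; simpa [List.contains_iff_mem] using ha

lemma pvEnd_mem {pc : List Char} {d : PySem.Dict String (String × String)} {s : String}
    {ends : List String} {j : Nat} {n : String}
    (he : (pvTraj pc d s j).any (fun n => ends.contains n) = true)
    (h : pvTraj pc d s j = some n) : n ∈ ends := by
  rw [h] at he; simpa [List.contains_iff_mem] using he

lemma pvTraj_succ_ex {pc : List Char} {d : PySem.Dict String (String × String)} {s : String}
    {j : Nat} {n' : String} (h : pvTraj pc d s (j+1) = some n') :
    ∃ node p, pvTraj pc d s j = some node ∧ PySem.Dict.get? d node = some p ∧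
      n' = (if pc.getD (j % pc.length) ' ' == 'L' then p.1 else p.2) := by
  rw [pvTraj] at h
  cases htr : pvTraj pc d s j with
  | none => rw [htr] at h; simp at h
  | some node =>
    rw [htr] at h
    simp only [Option.bind_some] at h
    unfold pvStep at h
    cases hg : PySem.Dict.get? d node with
    | none => rw [hg] at h; simp at h
    | some p =>
      rw [hg] at h
      simp only [Option.bind_some, Option.some_inj] at h
      exact ⟨node, p, rfl, hg, h.symm⟩

lemma pvNext_some (pc : List Char) (d : PySem.Dict String (String × String))
    (ends : List String) (s : String) (t : Nat)
    (hend : (pvTraj pc d s t).any (fun n => ends.contains n) = true)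
    (halive : ∀ j < t, (pvTraj pc d s j).any (fun n => !ends.contains n) = true)
    {k : Nat} (hk : k < t) : ∃ n', pvTraj pc d s (k+1) = some n' := by
  rcases Nat.lt_or_ge (k+1) t with h | h
  · have := halive (k+1) h
    cases h' : pvTraj pc d s (k+1) with
    | none => rw [h'] at this; simp at this
    | some n' => exact ⟨n', rfl⟩
  · have hteq : k + 1 = t := by omega
    rw [hteq]
    obtain ⟨n', hn', _⟩ := pvAny_mem hend
    exact ⟨n', hn'⟩

-- ===== A-side: one go_path_one pass =====
lemma pvGoPathOne_mid (pc : List Char) (d : PySem.Dict String (String × String))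
    (ends : List String) (s : String) (t b : Nat)
    (_hLpos : 0 < pc.length)
    (hend : (pvTraj pc d s t).any (fun n => ends.contains n) = true)
    (halive : ∀ j < t, (pvTraj pc d s j).any (fun n => !ends.contains n) = true)
    (hb : b % pc.length = 0) (hbt : t < b + pc.length) :
    ∀ r q node, t - (b + q) = r → b + q ≤ t → pvTraj pc d s (b + q) = some node →
    pvGoPathOne d ends (pc.length : Int) (PySem.List.enumerate (pc.drop q) (q : Int)) [node]
      = some (ends, ((t - b : Nat) : Int)) := by
  intro r
  induction r with
  | zero =>
    intro q node h0 hle htr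
    have hqt : b + q = t := by omega
    have hmem : node ∈ ends := pvEnd_mem hend (hqt ▸ htr)
    have hq : q < pc.length := by omega
    rw [List.drop_eq_getElem_cons hq, PySem.List.enumerate_cons, pvGoPathOne]
    have hsub : pvSubset [node] ends = true := by
      rw [pvSubset_singleton]; simp [hmem]
    simp only [hsub, if_true]
    have : q = t - b := by omega
    rw [this]
  | succ r ih =>
    intro q node hr hle htr
    have hlt : b + q < t := by omega
    have hq : q < pc.length := by omega
    have hnotmem : node ∉ ends := pvAlive_notmem (halive _ hlt) htr
    obtain ⟨n', hn'⟩ := pvNext_some pc d ends s t hend halive hlt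
    obtain ⟨node₀, p, hnode₀, hp, hnp⟩ := pvTraj_succ_ex hn'
    rw [htr] at hnode₀
    injection hnode₀ with hnode₀; subst hnode₀
    have hmod : (b + q) % pc.length = q := by
      rw [Nat.add_mod, hb]
      simp [Nat.mod_eq_of_lt hq]
    rw [List.drop_eq_getElem_cons hq, PySem.List.enumerate_cons, pvGoPathOne]
    have hsub : pvSubset [node] ends = false := by
      rw [pvSubset_singleton]; simp [hnotmem]
    simp only [hsub, Bool.false_eq_true, if_false]
    have hmapM : [node].mapM (fun n => (PySem.Dict.get? d n).map
        (fun pp => if pc[q] == 'L' then pp.1 else pp.2)) = some [n'] := by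
      simp [hp]
      rw [hnp, hmod, List.getD_eq_getElem pc ' ' hq]
      simp
    rw [hmapM]
    have hcast : (q : Int) + 1 = ((q + 1 : Nat) : Int) := by push_cast; ring
    rw [hcast]
    exact ih (q+1) n' (by omega) (by omega) (by rw [← Nat.add_assoc]; exact hn')

lemma pvGoPathOne_full (pc : List Char) (d : PySem.Dict String (String × String))
    (ends : List String) (s : String) (t b : Nat)
    (_hLpos : 0 < pc.length)
    (hend : (pvTraj pc d s t).any (fun n => ends.contains n) = true)
    (halive : ∀ j < t, (pvTraj pc d s j).any (fun n => !ends.contains n) = true)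
    (hb : b % pc.length = 0) (hbt : b + pc.length ≤ t) :
    ∀ r q node, pc.length - q = r → q ≤ pc.length → pvTraj pc d s (b + q) = some node →
    ∃ node', pvTraj pc d s (b + pc.length) = some node' ∧
      pvGoPathOne d ends (pc.length : Int) (PySem.List.enumerate (pc.drop q) (q : Int)) [node]
        = some ([node'], (pc.length : Int)) := by
  intro r
  induction r with
  | zero =>
    intro q node h0 hq htr
    have hqL : q = pc.length := by omega
    subst hqL
    rw [List.drop_length]
    exact ⟨node, htr, rfl⟩
  | succ r ih =>
    intro q node hr hq htr
    have hq' : q < pc.length := by omega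
    have hlt : b + q < t := by omega
    have hnotmem : node ∉ ends := pvAlive_notmem (halive _ hlt) htr
    obtain ⟨n', hn'⟩ := pvNext_some pc d ends s t hend halive hlt
    obtain ⟨node₀, p, hnode₀, hp, hnp⟩ := pvTraj_succ_ex hn'
    rw [htr] at hnode₀
    injection hnode₀ with hnode₀; subst hnode₀
    have hmod : (b + q) % pc.length = q := by
      rw [Nat.add_mod, hb]
      simp [Nat.mod_eq_of_lt hq']
    rw [List.drop_eq_getElem_cons hq', PySem.List.enumerate_cons, pvGoPathOne]
    have hsub : pvSubset [node] ends = false := by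
      rw [pvSubset_singleton]; simp [hnotmem]
    simp only [hsub, Bool.false_eq_true, if_false]
    have hmapM : [node].mapM (fun n => (PySem.Dict.get? d n).map
        (fun pp => if pc[q] == 'L' then pp.1 else pp.2)) = some [n'] := by
      simp [hp]
      rw [hnp, hmod, List.getD_eq_getElem pc ' ' hq']
      simp
    rw [hmapM]
    have hcast : (q : Int) + 1 = ((q + 1 : Nat) : Int) := by push_cast; ring
    rw [hcast]
    exact ih (q+1) n' (by omega) (by omega) (by rw [← Nat.add_assoc]; exact hn')

-- ===== A-side: the go_path while loop =====
lemma pvGoPath_main (pc : List Char) (d : PySem.Dict String (String × String))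
    (ends : List String) (s : String) (t : Nat)
    (hL : pc ≠ [])
    (hend : (pvTraj pc d s t).any (fun n => ends.contains n) = true)
    (halive : ∀ j < t, (pvTraj pc d s j).any (fun n => !ends.contains n) = true)
    (hdist : ∀ i2 < t, ∀ i1 < i2, i2 * pc.length < t →
      pvTraj pc d s (i1 * pc.length) ≠ pvTraj pc d s (i2 * pc.length)) :
    ∀ fuel m hist nodeB, t - m * pc.length + 2 ≤ fuel → m * pc.length < t →
    pvTraj pc d s (m * pc.length) = some nodeB →
    (∀ xs, xs ∈ hist ↔ ∃ i ≤ m, ∃ x, pvTraj pc d s (i * pc.length) = some x ∧ xs = [x]) →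
    pvGoPath pc d ends fuel hist [nodeB] ((m * pc.length : Nat) : Int) = some (t : Int) := by
  have hLpos : 0 < pc.length := List.length_pos_iff.mpr hL
  intro fuel
  induction fuel with
  | zero => intro m hist nodeB hf hmt _ _; omega
  | succ f ih =>
    intro m hist nodeB hf hmt htr hhist
    have hbmod : (m * pc.length) % pc.length = 0 := Nat.mul_mod_left _ _
    have hnotmem : nodeB ∉ ends := pvAlive_notmem (halive _ hmt) htr
    rw [pvGoPath]
    have hsub : pvSubset [nodeB] ends = false := by
      rw [pvSubset_singleton]; simp [hnotmem]
    simp only [hsub, Bool.false_eq_true, if_false]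
    have henum : PySem.List.enumerate pc 0 = PySem.List.enumerate (pc.drop 0) ((0 : Nat) : Int) := by
      norm_num
    by_cases hcase : t < m * pc.length + pc.length
    · have hrun := pvGoPathOne_mid pc d ends s t (m * pc.length) hLpos hend halive hbmod hcase
        (t - (m * pc.length + 0)) 0 nodeB rfl (by omega) (by simpa using htr)
      rw [henum, hrun]
      have hcont : hist.contains ends = false := by
        by_contra hcnt
        rw [Bool.not_eq_false, List.contains_iff_mem] at hcnt
        obtain ⟨i, him, x, htrx, hxeq⟩ := (hhist ends).mp hcnt
        have hx1 : x ∈ ends := by rw [hxeq]; simp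
        have hx2 : x ∉ ends := by
          refine pvAlive_notmem (halive (i * pc.length) ?_) htrx
          have : i * pc.length ≤ m * pc.length := Nat.mul_le_mul_right _ him
          omega
        exact hx2 hx1
      simp only [hcont, Bool.false_eq_true, if_false]
      obtain ⟨f', rfl⟩ : ∃ f', f = f' + 1 := ⟨f - 1, by omega⟩
      rw [pvGoPath]
      simp only [pvSubset_self, if_true]
      congr 1
      omega
    · rw [Nat.not_lt] at hcase
      obtain ⟨node', htr', hrun⟩ := pvGoPathOne_full pc d ends s t (m * pc.length) hLpos hend halive
        hbmod hcase (pc.length - 0) 0 nodeB rfl (by omega) (by simpa using htr)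
      rw [henum, hrun]
      have hsm : (m + 1) * pc.length = m * pc.length + pc.length := by ring
      have htr'' : pvTraj pc d s ((m + 1) * pc.length) = some node' := by rw [hsm]; exact htr'
      have hcont : hist.contains [node'] = false := by
        by_contra hcnt
        rw [Bool.not_eq_false, List.contains_iff_mem] at hcnt
        obtain ⟨i, him, x, htrx, hxeq⟩ := (hhist [node']).mp hcnt
        injection hxeq with hxeq _
        subst hxeq
        by_cases hT : m * pc.length + pc.length = t
        · have hmem : node' ∈ ends := pvEnd_mem hend (by rw [hT] at htr'; exact htr')
          refine pvAlive_notmem (halive (i * pc.length) ?_) htrx hmem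
          have : i * pc.length ≤ m * pc.length := Nat.mul_le_mul_right _ him
          omega
        · have hTlt : (m + 1) * pc.length < t := by omega
          have hi2 : m + 1 < t := by
            have : m + 1 ≤ (m + 1) * pc.length := Nat.le_mul_of_pos_right _ hLpos
            omega
          exact hdist (m + 1) hi2 i (by omega) hTlt (by rw [htrx, htr''])
      simp only [hcont, Bool.false_eq_true, if_false]
      have hstep : ((m * pc.length : Nat) : Int) + (pc.length : Int) = (((m + 1) * pc.length : Nat) : Int) := by
        push_cast; ring
      rw [hstep]
      by_cases hT : (m + 1) * pc.length = t
      · obtain ⟨f', rfl⟩ : ∃ f', f = f' + 1 := ⟨f - 1, by omega⟩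
        rw [pvGoPath]
        have hmem : node' ∈ ends := pvEnd_mem hend (by rw [hT] at htr''; exact htr'')
        have hsub2 : pvSubset [node'] ends = true := by
          rw [pvSubset_singleton]; simp [hmem]
        simp only [hsub2, if_true]
        rw [hT]
      · have hTlt : (m + 1) * pc.length < t := by omega
        apply ih (m + 1) _ node' (by omega) hTlt htr''
        intro xs
        simp only [List.mem_append, List.mem_singleton, hhist xs]
        constructor
        · rintro (⟨i, him, x, htrx, hxeq⟩ | rfl)
          · exact ⟨i, by omega, x, htrx, hxeq⟩
          · exact ⟨m + 1, le_refl _, node', htr'', rfl⟩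
        · rintro ⟨i, him, x, htrx, hxeq⟩
          rcases Nat.lt_or_ge i (m + 1) with h' | h'
          · exact Or.inl ⟨i, by omega, x, htrx, hxeq⟩
          · have : i = m + 1 := by omega
            subst this
            rw [htr''] at htrx
            injection htrx with hx
            subst hx
            exact Or.inr hxeq

-- ===== B-side: specification of the composed pass table =====
-- pvF r i n: the table entry for node n at instruction offset i (r = L - i remaining instructions)
def pvF (pc : List Char) (d : PySem.Dict String (String × String)) (endsSet : PySem.Set String)
    (nodes : List String) : Nat → Nat → String → Option PvEntry
  | 0, _, n => if n ∈ nodes then some (.land n) else none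
  | r+1, i, n =>
    if PySem.Set.contains endsSet n then some (.hit 0)
    else
      match PySem.Dict.get? d n with
      | none => none
      | some p =>
        match pvF pc d endsSet nodes r (i+1) (if pc.getD i ' ' == 'L' then p.1 else p.2) with
        | none => none
        | some (.hit k) => some (.hit (k + 1))
        | some e => some e


-- ===== B-side: the table fold computes pvF =====
lemma pvTblStep_get? (pc : List Char) (d : PySem.Dict String (String × String))
    (ends : List String) (nodes : List String) (r i : Nat)
    (old : PySem.Dict String PvEntry)
    (hold : ∀ x, PySem.Dict.get? old x = pvF pc d (PySem.Set.ofList ends) nodes r (i+1) x) :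
    ∀ (ns : List String) (acc : PySem.Dict String PvEntry), ns.Nodup →
    (∀ x ∈ ns, PySem.Dict.get? acc x = none) →
    ∀ x, PySem.Dict.get? (ns.foldl (fun new n =>
      if PySem.Set.contains (PySem.Set.ofList ends) n then new.insert n (.hit 0)
      else
        match PySem.Dict.get? d n with
        | none => new
        | some p =>
          match PySem.Dict.get? old (if (pc.getD i ' ' == 'L') then p.1 else p.2) with
          | none => new
          | some (.hit k) => new.insert n (.hit (k + 1))
          | some e => new.insert n e) acc) x
      = if x ∈ ns then pvF pc d (PySem.Set.ofList ends) nodes (r+1) i x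
        else PySem.Dict.get? acc x := by
  have hbody : ∀ (acc : PySem.Dict String PvEntry) (n : String),
      (if PySem.Set.contains (PySem.Set.ofList ends) n then acc.insert n (.hit 0)
       else
        match PySem.Dict.get? d n with
        | none => acc
        | some p =>
          match PySem.Dict.get? old (if (pc.getD i ' ' == 'L') then p.1 else p.2) with
          | none => acc
          | some (.hit k) => acc.insert n (.hit (k + 1))
          | some e => acc.insert n e)
      = match pvF pc d (PySem.Set.ofList ends) nodes (r+1) i n with
        | none => acc
        | some e => acc.insert n e := by
    intro acc n
    rw [pvF]
    by_cases hc : PySem.Set.contains (PySem.Set.ofList ends) n = true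
    · simp only [hc, if_true]
    · rw [Bool.not_eq_true] at hc
      simp only [hc, Bool.false_eq_true, if_false]
      cases hg : PySem.Dict.get? d n with
      | none => rfl
      | some p =>
        dsimp only
        rw [hold]
        cases pvF pc d (PySem.Set.ofList ends) nodes r (i+1)
            (if (pc.getD i ' ' == 'L') then p.1 else p.2) with
        | none => rfl
        | some e => cases e <;> rfl
  intro ns
  induction ns with
  | nil => intro acc _ _ x; simp
  | cons n ns ih =>
    intro acc hnd hacc x
    rw [List.nodup_cons] at hnd
    rw [List.foldl_cons, hbody]
    have hstep : ∀ y ∈ ns, PySem.Dict.get?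
        (match pvF pc d (PySem.Set.ofList ends) nodes (r+1) i n with
         | none => acc
         | some e => acc.insert n e) y = none := by
      intro y hy
      have hyn : y ≠ n := fun h => hnd.1 (h ▸ hy)
      cases hF : pvF pc d (PySem.Set.ofList ends) nodes (r+1) i n with
      | none => exact hacc y (by simp [hy])
      | some e =>
        rw [PySem.Dict.get?_insert_of_ne _ _ hyn]
        exact hacc y (by simp [hy])
    rw [ih _ hnd.2 hstep x]
    by_cases hx : x ∈ ns
    · simp [hx]
    · simp only [hx, if_false, List.mem_cons]
      by_cases hxn : x = n
      · subst hxn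
        cases hF : pvF pc d (PySem.Set.ofList ends) nodes (r+1) i x with
        | none => simp [hacc x (by simp)]
        | some e => simp [PySem.Dict.get?_insert_self]
      · cases hF : pvF pc d (PySem.Set.ofList ends) nodes (r+1) i n with
        | none => simp [hxn]
        | some e => simp [hxn, PySem.Dict.get?_insert_of_ne _ _ hxn]

lemma pvBase_get? (ns : List String) :
    ∀ (acc : PySem.Dict String PvEntry), ns.Nodup →
    (∀ x ∈ ns, PySem.Dict.get? acc x = none) →
    ∀ x, PySem.Dict.get? (ns.foldl (fun t n => t.insert n (.land n)) acc) x
      = if x ∈ ns then some (.land x) else PySem.Dict.get? acc x := by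
  induction ns with
  | nil => intro acc _ _ x; simp
  | cons n ns ih =>
    intro acc hnd hacc x
    rw [List.nodup_cons] at hnd
    rw [List.foldl_cons]
    have hstep : ∀ y ∈ ns, PySem.Dict.get? (acc.insert n (.land n)) y = none := by
      intro y hy
      have hyn : y ≠ n := fun h => hnd.1 (h ▸ hy)
      rw [PySem.Dict.get?_insert_of_ne _ _ hyn]
      exact hacc y (by simp [hy])
    rw [ih _ hnd.2 hstep x]
    by_cases hx : x ∈ ns
    · simp [hx]
    · by_cases hxn : x = n
      · subst hxn; simp [hx, PySem.Dict.get?_insert_self]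
      · simp [hx, hxn, PySem.Dict.get?_insert_of_ne _ _ hxn]

-- the whole right-to-left fold over the instruction string computes pvF at offset 0
lemma pvTbl_spec (pc : List Char) (d : PySem.Dict String (String × String))
    (ends : List String) (nodes : List String)
    (hnodes : ∀ x, x ∈ nodes ↔ (PySem.Dict.get? d x ≠ none ∨ x ∈ ends))
    (hnd : nodes.Nodup) :
    ∀ (i : Nat), i ≤ pc.length →
    ∀ tbl, (∀ x, PySem.Dict.get? tbl x = pvF pc d (PySem.Set.ofList ends) nodes (pc.length - i) i x) →
    ∀ x, PySem.Dict.get? ((PySem.List.pyRange ((i : Int) - 1) (-1) (-1)).foldl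
        (fun tbl j => pvTblStep d (PySem.Set.ofList ends) (PySem.List.pyGetD pc j ' ' == 'L') tbl nodes) tbl) x
      = pvF pc d (PySem.Set.ofList ends) nodes pc.length 0 x := by
  intro i
  induction i with
  | zero =>
    intro _ tbl htbl x
    rw [PySem.List.pyRange_neg_one_eq_nil (by norm_num)]
    simpa using htbl x
  | succ i ih =>
    intro hi tbl htbl x
    have hilt : i < pc.length := by omega
    have hstart : ((i + 1 : Nat) : Int) - 1 = (i : Int) := by push_cast; ring
    rw [hstart, PySem.List.pyRange_neg_one_cons (by omega), List.foldl_cons]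
    have hg : PySem.List.pyGetD pc ((i : Nat) : Int) ' ' = pc.getD i ' ' := by
      simp [PySem.List.pyGetD_natCast]
    have hnew : ∀ y, PySem.Dict.get?
        (pvTblStep d (PySem.Set.ofList ends) (PySem.List.pyGetD pc ((i : Nat) : Int) ' ' == 'L') tbl nodes) y
        = pvF pc d (PySem.Set.ofList ends) nodes (pc.length - i) i y := by
      intro y
      rw [pvTblStep, hg]
      have hempty : ∀ x ∈ nodes, PySem.Dict.get? (PySem.Dict.empty : PySem.Dict String PvEntry) x = none := by
        intro x _; exact PySem.Dict.get?_empty x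
      have hr : pc.length - i = (pc.length - (i+1)) + 1 := by omega
      rw [hr]
      rw [pvTblStep_get? pc d ends nodes (pc.length - (i+1)) i tbl htbl nodes PySem.Dict.empty hnd hempty y]
      by_cases hy : y ∈ nodes
      · simp [hy]
      · simp only [hy, if_false]
        have hdy : PySem.Dict.get? d y = none := by
          by_contra hc
          exact hy ((hnodes y).mpr (Or.inl hc))
        have hey : y ∉ ends := fun hc => hy ((hnodes y).mpr (Or.inr hc))
        have hcy : PySem.Set.contains (PySem.Set.ofList ends) y = false := by
          simp only [PySem.Set.contains_eq_listContains]
          simp [hey]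
        rw [pvF, hcy, hdy]
        simp
    have hi' : i ≤ pc.length := by omega
    have := ih hi' _ hnew x
    rw [← this]


-- ===== B-side: the table entries describe the trajectory =====
lemma pvF_hit (pc : List Char) (d : PySem.Dict String (String × String))
    (ends : List String) (nodes : List String) (s : String) (t b : Nat)
    (hend : (pvTraj pc d s t).any (fun n => ends.contains n) = true)
    (halive : ∀ j < t, (pvTraj pc d s j).any (fun n => !ends.contains n) = true)
    (hb : b % pc.length = 0) (hbt : t < b + pc.length) :
    ∀ r i node, t - (b + i) = r → b + i ≤ t → pvTraj pc d s (b + i) = some node →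
    pvF pc d (PySem.Set.ofList ends) nodes (pc.length - i) i node = some (.hit (t - (b + i))) := by
  intro r
  induction r with
  | zero =>
    intro i node h0 hle htr
    have hqt : b + i = t := by omega
    have hmem : node ∈ ends := pvEnd_mem hend (hqt ▸ htr)
    have hi : i < pc.length := by omega
    obtain ⟨r', hr'⟩ : ∃ r', pc.length - i = r' + 1 := ⟨pc.length - i - 1, by omega⟩
    rw [hr', pvF]
    have hc : PySem.Set.contains (PySem.Set.ofList ends) node = true := by
      simp only [PySem.Set.contains_eq_listContains]
      simp [hmem]
    rw [hc]
    simp only [if_true]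
    rw [h0]
  | succ r ih =>
    intro i node hr hle htr
    have hlt : b + i < t := by omega
    have hi : i < pc.length := by omega
    have hnotmem : node ∉ ends := pvAlive_notmem (halive _ hlt) htr
    obtain ⟨n', hn'⟩ := pvNext_some pc d ends s t hend halive hlt
    obtain ⟨node₀, p, hnode₀, hp, hnp⟩ := pvTraj_succ_ex hn'
    rw [htr] at hnode₀
    injection hnode₀ with hnode₀; subst hnode₀
    have hmod : (b + i) % pc.length = i := by
      rw [Nat.add_mod, hb]
      simp [Nat.mod_eq_of_lt hi]
    obtain ⟨r', hr'⟩ : ∃ r', pc.length - i = r' + 1 := ⟨pc.length - i - 1, by omega⟩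
    rw [hr', pvF]
    have hc : PySem.Set.contains (PySem.Set.ofList ends) node = false := by
      simp only [PySem.Set.contains_eq_listContains]
      simp [hnotmem]
    rw [hc]
    simp only [Bool.false_eq_true, if_false]
    rw [hp]
    dsimp only
    have hchild : (if (pc.getD i ' ' == 'L') then p.1 else p.2) = n' := by
      rw [hnp, hmod]
    rw [hchild]
    have hrec := ih (i+1) n' (by omega) (by omega) (by rw [← Nat.add_assoc]; exact hn')
    have hr'' : pc.length - (i + 1) = r' := by omega
    rw [hr''] at hrec
    rw [hrec]
    dsimp only
    have harith : t - (b + (i + 1)) + 1 = t - (b + i) := by omega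
    rw [harith]

lemma pvF_land (pc : List Char) (d : PySem.Dict String (String × String))
    (ends : List String) (nodes : List String) (s : String) (t b : Nat)
    (hnodes : ∀ x, (PySem.Dict.get? d x ≠ none ∨ x ∈ ends) → x ∈ nodes)
    (hend : (pvTraj pc d s t).any (fun n => ends.contains n) = true)
    (halive : ∀ j < t, (pvTraj pc d s j).any (fun n => !ends.contains n) = true)
    (hb : b % pc.length = 0) (hbL : b + pc.length ≤ t) :
    ∀ r i node, pc.length - i = r → i ≤ pc.length → pvTraj pc d s (b + i) = some node →
    ∃ m, pvTraj pc d s (b + pc.length) = some m ∧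
      pvF pc d (PySem.Set.ofList ends) nodes r i node = some (.land m) := by
  intro r
  induction r with
  | zero =>
    intro i node h0 hi htr
    have hiL : i = pc.length := by omega
    subst hiL
    refine ⟨node, htr, ?_⟩
    rw [pvF]
    have hmem : node ∈ nodes := by
      apply hnodes
      by_cases hT : b + pc.length = t
      · exact Or.inr (pvEnd_mem hend (hT ▸ htr))
      · have hlt : b + pc.length < t := by omega
        obtain ⟨n', hn'⟩ := pvNext_some pc d ends s t hend halive hlt
        obtain ⟨node₀, p, hnode₀, hp, _⟩ := pvTraj_succ_ex hn'
        rw [htr] at hnode₀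
        injection hnode₀ with hnode₀; subst hnode₀
        exact Or.inl (by rw [hp]; simp)
    rw [if_pos hmem]
  | succ r ih =>
    intro i node hr hi htr
    have hi' : i < pc.length := by omega
    have hlt : b + i < t := by omega
    have hnotmem : node ∉ ends := pvAlive_notmem (halive _ hlt) htr
    obtain ⟨n', hn'⟩ := pvNext_some pc d ends s t hend halive hlt
    obtain ⟨node₀, p, hnode₀, hp, hnp⟩ := pvTraj_succ_ex hn'
    rw [htr] at hnode₀
    injection hnode₀ with hnode₀; subst hnode₀
    have hmod : (b + i) % pc.length = i := by
      rw [Nat.add_mod, hb]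
      simp [Nat.mod_eq_of_lt hi']
    obtain ⟨m, hm, hFm⟩ := ih (i+1) n' (by omega) (by omega) (by rw [← Nat.add_assoc]; exact hn')
    refine ⟨m, hm, ?_⟩
    rw [pvF]
    have hc : PySem.Set.contains (PySem.Set.ofList ends) node = false := by
      simp only [PySem.Set.contains_eq_listContains]
      simp [hnotmem]
    rw [hc]
    simp only [Bool.false_eq_true, if_false]
    rw [hp]
    dsimp only
    have hchild : (if (pc.getD i ' ' == 'L') then p.1 else p.2) = n' := by
      rw [hnp, hmod]
    rw [hchild, hFm]

-- ===== B-side: the per-start-node table walk =====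
lemma pvWalk_main (pc : List Char) (d : PySem.Dict String (String × String))
    (ends : List String) (nodes : List String) (tbl : PySem.Dict String PvEntry)
    (hnodes : ∀ x, (PySem.Dict.get? d x ≠ none ∨ x ∈ ends) → x ∈ nodes)
    (htbl : ∀ x, PySem.Dict.get? tbl x = pvF pc d (PySem.Set.ofList ends) nodes pc.length 0 x)
    (s : String) (t : Nat) (hL : pc ≠ [])
    (hend : (pvTraj pc d s t).any (fun n => ends.contains n) = true)
    (halive : ∀ j < t, (pvTraj pc d s j).any (fun n => !ends.contains n) = true)
    (hdist : ∀ i2 < t, ∀ i1 < i2, i2 * pc.length < t →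
      pvTraj pc d s (i1 * pc.length) ≠ pvTraj pc d s (i2 * pc.length)) :
    ∀ fuel p seen cur, t - p * pc.length ≤ fuel * pc.length → p * pc.length < t →
    pvTraj pc d s (p * pc.length) = some cur →
    (∀ x : String, x ∈ seen ↔ ∃ i ≤ p, pvTraj pc d s (i * pc.length) = some x) →
    pvWalk tbl (PySem.Set.ofList ends) pc.length fuel seen cur p = some t := by
  have hLpos : 0 < pc.length := List.length_pos_iff.mpr hL
  intro fuel
  induction fuel with
  | zero =>
    intro p seen cur hf hp _ _
    simp only [Nat.zero_mul] at hf
    omega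
  | succ f ih =>
    intro p seen cur hf hp htr hseen
    have hbmod : (p * pc.length) % pc.length = 0 := Nat.mul_mod_left _ _
    rw [pvWalk, htbl cur]
    by_cases hcase : t < p * pc.length + pc.length
    · have hhit := pvF_hit pc d ends nodes s t (p * pc.length) hend halive hbmod hcase
        (t - (p * pc.length + 0)) 0 cur rfl (by omega) (by simpa using htr)
      simp only [Nat.add_zero, Nat.sub_zero] at hhit
      rw [hhit]
      dsimp only
      have harith : p * pc.length + (t - p * pc.length) = t := by omega
      rw [harith]
    · rw [Nat.not_lt] at hcase
      obtain ⟨m, hm, hland⟩ := pvF_land pc d ends nodes s t (p * pc.length) hnodes hend halive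
        hbmod hcase (pc.length - 0) 0 cur rfl (by omega) (by simpa using htr)
      rw [Nat.sub_zero] at hland
      rw [hland]
      dsimp only
      have hsm : (p + 1) * pc.length = p * pc.length + pc.length := by ring
      have hm' : pvTraj pc d s ((p + 1) * pc.length) = some m := by rw [hsm]; exact hm
      by_cases hT : p * pc.length + pc.length = t
      · have hmem : m ∈ ends := pvEnd_mem hend (hT ▸ hm)
        have hcm : PySem.Set.contains (PySem.Set.ofList ends) m = true := by
          simp only [PySem.Set.contains_eq_listContains]
          simp [hmem]
        rw [hcm]
        simp only [if_true]
        rw [hsm, hT]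
      · have hTlt : (p + 1) * pc.length < t := by omega
        have hnotmem : m ∉ ends := pvAlive_notmem (halive _ hTlt) hm'
        have hcm : PySem.Set.contains (PySem.Set.ofList ends) m = false := by
          simp only [PySem.Set.contains_eq_listContains]
          simp [hnotmem]
        rw [hcm]
        simp only [Bool.false_eq_true, if_false]
        have hmseen : m ∉ seen := by
          intro hmem
          obtain ⟨i, hi, htrx⟩ := (hseen m).mp hmem
          have hi2 : p + 1 < t := by
            have : p + 1 ≤ (p + 1) * pc.length := Nat.le_mul_of_pos_right _ hLpos
            omega
          exact hdist (p + 1) hi2 i (by omega) hTlt (by rw [htrx, hm'])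
        have hcs : PySem.Set.contains seen m = false := by
          simp [hmseen]
        rw [hcs]
        simp only [Bool.false_eq_true, if_false]
        refine ih (p + 1) _ m ?_ hTlt hm' ?_
        · have hfl : (f + 1) * pc.length = f * pc.length + pc.length := by ring
          rw [hsm]
          omega
        intro x
        rw [PySem.Set.mem_add, hseen x]
        constructor
        · rintro (⟨i, hi, htrx⟩ | rfl)
          · exact ⟨i, by omega, htrx⟩
          · exact ⟨p + 1, le_refl _, hm'⟩
        · rintro ⟨i, hi, htrx⟩
          rcases Nat.lt_or_ge i (p + 1) with h' | h'
          · exact Or.inl ⟨i, by omega, htrx⟩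
          · have : i = p + 1 := by omega
            subst this
            rw [hm'] at htrx
            injection htrx with hx
            exact Or.inr hx.symm

-- ===== per-start-node agreement =====
lemma pvNode_eq (pc : List Char) (d : PySem.Dict String (String × String))
    (ends : List String) (nodes : List String) (tbl : PySem.Dict String PvEntry)
    (mapLen : Nat)
    (hnodes : ∀ x, (PySem.Dict.get? d x ≠ none ∨ x ∈ ends) → x ∈ nodes)
    (htbl : ∀ x, PySem.Dict.get? tbl x = pvF pc d (PySem.Set.ofList ends) nodes pc.length 0 x)
    (s : String)
    (h : pvNodeOk pc d ends s ((mapLen + 1) * pc.length)) :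
    ∃ tn : Nat,
      pvGoPath pc d ends ((mapLen + 1) * pc.length + 2) [[s]] [s] 0 = some ((tn : Nat) : Int) ∧
      (if PySem.Set.contains (PySem.Set.ofList ends) s then some 0
       else pvWalk tbl (PySem.Set.ofList ends) pc.length (mapLen + 3) (PySem.Set.ofList [s]) s 0)
        = some tn := by
  by_cases hs : s ∈ ends
  · refine ⟨0, ?_, ?_⟩
    · rw [pvGoPath]
      have hsub : pvSubset [s] ends = true := by rw [pvSubset_singleton]; simp [hs]
      simp [hsub]
    · have hc : PySem.Set.contains (PySem.Set.ofList ends) s = true := by simp [hs]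
      rw [hc]
      simp
  · rcases h with hs' | ⟨hne, t, htb, ht0, hend, halive, hdist⟩
    · exact absurd hs' hs
    have hLpos : 0 < pc.length := List.length_pos_iff.mpr hne
    refine ⟨t, ?_, ?_⟩
    · have hmain := pvGoPath_main pc d ends s t hne hend halive hdist
        ((mapLen + 1) * pc.length + 2) 0 [[s]] s (by omega) (by omega)
        (by rw [Nat.zero_mul]; rfl)
      simp only [Nat.zero_mul, Nat.cast_zero] at hmain
      apply hmain
      intro xs
      simp only [List.mem_singleton]
      constructor
      · rintro rfl
        exact ⟨0, le_refl _, s, by rw [Nat.zero_mul]; rfl, rfl⟩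
      · rintro ⟨i, hi, x, htrx, hxeq⟩
        have hi0 : i = 0 := by omega
        subst hi0
        rw [Nat.zero_mul] at htrx
        injection htrx with hx
        rw [hxeq, hx]
    · have hs0 : PySem.Set.contains (PySem.Set.ofList ends) s = false := by simp [hs]
      simp only [hs0, Bool.false_eq_true, if_false]
      have := pvWalk_main pc d ends nodes tbl hnodes htbl s t hne hend halive hdist
        (mapLen + 3) 0 (PySem.Set.ofList [s]) s
        (by simp only [Nat.zero_mul, Nat.sub_zero]
            calc t ≤ (mapLen + 1) * pc.length := by omega
              _ ≤ (mapLen + 3) * pc.length := Nat.mul_le_mul_right _ (by omega))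
        (by simpa using ht0) (by rw [Nat.zero_mul]; rfl) ?_
      · exact this
      · intro x
        rw [PySem.Set.mem_ofList]
        simp only [List.mem_singleton]
        constructor
        · rintro rfl
          exact ⟨0, le_refl _, by rw [Nat.zero_mul]; rfl⟩
        · rintro ⟨i, hi, htrx⟩
          have hi0 : i = 0 := by omega
          subst hi0
          rw [Nat.zero_mul] at htrx
          injection htrx with hx
          exact hx.symm

lemma pvMapM_pair (fA : String → Option Int) (fB : String → Option Nat) :
    ∀ l : List String, (∀ x ∈ l, ∃ tn : Nat, fA x = some ((tn : Nat) : Int) ∧ fB x = some tn) →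
    ∃ ts : List Nat, l.mapM fA = some (ts.map (fun n => ((n : Nat) : Int))) ∧ l.mapM fB = some ts := by
  intro l
  induction l with
  | nil => intro _; exact ⟨[], by simp, by simp⟩
  | cons x xs ih =>
    intro h
    obtain ⟨tn, hA, hB⟩ := h x (by simp)
    obtain ⟨ts, hAs, hBs⟩ := ih (fun y hy => h y (by simp [hy]))
    exact ⟨tn :: ts, by simp [List.mapM_cons, hA, hAs], by simp [List.mapM_cons, hB, hBs]⟩

theorem go_path_lcm_spec : Claim_equal_go_path_lcm := by
  intro network_path network_map start_nodes end_nodes _hdom hpre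
  unfold Spec_go_path_lcm go_path_lcm go_path_lcm_alt
  dsimp only
  have hnd : (PySem.List.dedup ((PySem.Dict.ofList network_map).keys ++ end_nodes)).Nodup :=
    PySem.List.nodup_dedup _
  have hnodes_iff : ∀ x, x ∈ PySem.List.dedup ((PySem.Dict.ofList network_map).keys ++ end_nodes) ↔
      (PySem.Dict.get? (PySem.Dict.ofList network_map) x ≠ none ∨ x ∈ end_nodes) := by
    intro x
    rw [PySem.List.mem_dedup, List.mem_append]
    constructor
    · rintro (hk | he)
      · exact Or.inl (fun hn => ((PySem.Dict.get?_eq_none_iff_not_mem_keys _ _).mp hn) hk)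
      · exact Or.inr he
    · rintro (hg | he)
      · exact Or.inl (by
          by_contra hk
          exact hg ((PySem.Dict.get?_eq_none_iff_not_mem_keys _ _).mpr hk))
      · exact Or.inr he
  have hbase : ∀ x, PySem.Dict.get?
      ((PySem.List.dedup ((PySem.Dict.ofList network_map).keys ++ end_nodes)).foldl
        (fun t n => t.insert n (.land n)) PySem.Dict.empty) x
      = pvF network_path.toList (PySem.Dict.ofList network_map) (PySem.Set.ofList end_nodes)
          (PySem.List.dedup ((PySem.Dict.ofList network_map).keys ++ end_nodes))
          (network_path.toList.length - network_path.toList.length) network_path.toList.length x := by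
    intro x
    rw [pvBase_get? _ PySem.Dict.empty hnd (fun y _ => PySem.Dict.get?_empty y) x, Nat.sub_self, pvF]
    simp [PySem.Dict.get?_empty]
  have htbl := pvTbl_spec network_path.toList (PySem.Dict.ofList network_map) end_nodes
    (PySem.List.dedup ((PySem.Dict.ofList network_map).keys ++ end_nodes)) hnodes_iff hnd
    network_path.toList.length (le_refl _) _ hbase
  obtain ⟨ts, hA, hB⟩ := pvMapM_pair
    (fun s => pvGoPath network_path.toList (PySem.Dict.ofList network_map) end_nodes
      ((network_map.length + 1) * network_path.toList.length + 2) [[s]] [s] 0)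
    (fun s => if PySem.Set.contains (PySem.Set.ofList end_nodes) s then some 0
      else pvWalk ((PySem.List.pyRange ((network_path.toList.length : Int) - 1) (-1) (-1)).foldl
          (fun tbl i => pvTblStep (PySem.Dict.ofList network_map) (PySem.Set.ofList end_nodes)
            (PySem.List.pyGetD network_path.toList i ' ' == 'L') tbl
            (PySem.List.dedup ((PySem.Dict.ofList network_map).keys ++ end_nodes)))
          ((PySem.List.dedup ((PySem.Dict.ofList network_map).keys ++ end_nodes)).foldl
            (fun t n => t.insert n (.land n)) PySem.Dict.empty))
        (PySem.Set.ofList end_nodes) network_path.toList.length (network_map.length + 3)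
        (PySem.Set.ofList [s]) s 0)
    start_nodes
    (fun s hsm => pvNode_eq network_path.toList (PySem.Dict.ofList network_map) end_nodes
      (PySem.List.dedup ((PySem.Dict.ofList network_map).keys ++ end_nodes)) _ network_map.length
      (fun x hx => (hnodes_iff x).mpr hx) htbl s (hpre s hsm))
  rw [hA, hB]
  dsimp only
  rw [List.foldl_map]
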